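-- pv_equiv track=rewrite | github.com/l3mnt2010/TTATTT | cau27.py | findAB
-- ===== SOURCE A (Python) =====
-- import math
--
-- def checkPrime(n):
--     if n <= 1:
--         return False
--     for i in range(2, (int(math.sqrt(n))) + 1):
--         if n % i == 0:
--             return False
--     return True
--
-- def gcd(a, b):
--     while a :
--         a , b = b%a , a
--     return b
--
-- def findAB(a, b):
--     listRes = []
--     for i in range(a, b):
--         for j in range(i + 1, b):
--             if checkPrime(gcd(i, j)):
--                 listTmp = [i, j , gcd(i,j)]
--                 listRes.append(listTmp)
--     return listRes
-- ===== SOURCE B (Python) =====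
-- def gcd(a, b):
--     while a:
--         a, b = b % a, a
--     return b
--
--
-- def findAB(a, b):
--     # Any positive gcd of a pair a <= i < j < b divides j - i, so it is below
--     # min(b, b - a).  Sieve: mark every proper multiple m = p*k (k >= 2) of every
--     # p below that limit; the unmarked numbers are exactly the primes we can meet.
--     limit = min(b, b - a)
--     comp = set()
--     for p in range(2, limit):
--         for m in range(2 * p, limit, p):
--             comp.add(m)
--     primes = set()
--     for n in range(2, limit):
--         if n not in comp:
--             primes.add(n)
--     return [[i, j, g]
--             for i in range(a, b)
--             for j in range(i + 1, b)
--             if (g := gcd(i, j)) in primes]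
-- ===== Notes on version B (the rewrite author's own statement) =====
-- stated objective: alternative
-- what changed: A trial-divides gcd(i,j) for primality (and recomputes the gcd) inside the quadratic pair loop; B first sieves a prime table up to min(b, b-a) by marking multiples, then computes each gcd once (walrus) and tests membership in the table inside a comprehension; the pair loop with its gcd dominates, so overall cost is similar.
import Mathlib
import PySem

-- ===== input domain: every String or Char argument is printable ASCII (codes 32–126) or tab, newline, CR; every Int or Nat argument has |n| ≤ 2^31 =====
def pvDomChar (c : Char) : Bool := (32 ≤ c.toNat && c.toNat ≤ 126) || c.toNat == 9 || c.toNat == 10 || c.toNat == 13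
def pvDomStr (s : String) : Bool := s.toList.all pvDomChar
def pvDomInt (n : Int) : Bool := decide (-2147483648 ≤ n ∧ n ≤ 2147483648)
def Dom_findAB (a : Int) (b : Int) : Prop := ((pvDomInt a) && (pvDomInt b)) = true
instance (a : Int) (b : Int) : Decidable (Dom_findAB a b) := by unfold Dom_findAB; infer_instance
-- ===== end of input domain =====

-- B replaces A's per-pair trial-division primality test (with a recomputed gcd) by a prime
-- table sieved once up to min(b, b-a) and a single gcd per pair (objective: alternative).

-- ===== PORT A =====

-- |Python mod| shrinks below |divisor|: needed for gcd's termination (used by both ports)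
theorem pvModAbsLt (b a : Int) (h : a ≠ 0) : (PySem.Int.mod b a).natAbs < a.natAbs := by
  rcases lt_or_gt_of_ne h with hn | hp
  · have := PySem.Int.mod_neg_bounds b hn
    omega
  · have h1 := PySem.Int.mod_nonneg b hp
    have h2 := PySem.Int.mod_lt b hp
    omega

-- checkPrime(n): trial division over range(2, int(math.sqrt(n)) + 1); on the |n| ≤ 2^31
-- domain int(math.sqrt(n)) equals Nat.sqrt n (the float sqrt is exact enough there)
def checkPrime (n : Int) : Bool :=
  if n ≤ 1 then false
  else (PySem.List.pyRange 2 ((Nat.sqrt n.toNat : Int) + 1)).all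
        (fun i => !(PySem.Int.mod n i == 0))

-- gcd(a, b): while a: a, b = b % a, a; return b
def gcdPy (a b : Int) : Int :=
  if _h : a = 0 then b
  else gcdPy (PySem.Int.mod b a) a
termination_by a.natAbs
decreasing_by exact pvModAbsLt b a _h

def findAB (a : Int) (b : Int) : List (List Int) :=
  (PySem.List.pyRange a b).foldl (fun res i =>
    (PySem.List.pyRange (i + 1) b).foldl (fun res j =>
      if checkPrime (gcdPy i j) then res ++ [[i, j, gcdPy i j]] else res) res) []

-- ===== PORT B =====

-- B's own gcd helper (Source B keeps the same gcd code as A)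
def gcdB (a b : Int) : Int :=
  if _h : a = 0 then b
  else gcdB (PySem.Int.mod b a) a
termination_by a.natAbs
decreasing_by exact pvModAbsLt b a _h

-- comp: every proper multiple m = p*k (k ≥ 2, via range(2*p, limit, p)) of every p in [2, limit)
def pvComp (limit : Int) : PySem.Set Int :=
  (PySem.List.pyRange 2 limit).foldl (fun s p =>
    (PySem.List.pyRange (2 * p) limit p).foldl (fun s m => s.add m) s) PySem.Set.empty

-- primes: the unmarked numbers of [2, limit)
def pvPrimes (limit : Int) : PySem.Set Int :=
  (PySem.List.pyRange 2 limit).foldl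
    (fun s n => if (pvComp limit).contains n then s else s.add n) PySem.Set.empty

def findAB_alt (a : Int) (b : Int) : List (List Int) :=
  let limit := min b (b - a)
  let primes := pvPrimes limit
  (PySem.List.pyRange a b).flatMap (fun i =>
    (PySem.List.pyRange (i + 1) b).filterMap (fun j =>
      let g := gcdB i j
      if primes.contains g then some [i, j, g] else none))

-- ===== PRECONDITION & SPEC =====
def Spec_findAB (a : Int) (b : Int) (out : List (List Int)) : Prop := out = findAB_alt a b
instance (a : Int) (b : Int) (out : List (List Int)) : Decidable (Spec_findAB a b out) := by unfold Spec_findAB; infer_instance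

-- ===== CLAIM (what is proved, stated in full; the proofs are below) =====
def Claim_equal_findAB : Prop := ∀ (a : Int) (b : Int), Dom_findAB a b → Spec_findAB a b (findAB a b)

-- ===== LEMMAS AND PROOFS =====

theorem gcdB_eq_gcdPy (a b : Int) : gcdB a b = gcdPy a b := by
  by_cases h : a = 0
  · rw [gcdB, gcdPy]; simp [h]
  · rw [gcdB, gcdPy]; simp only [h, dif_neg, not_false_iff]
    exact gcdB_eq_gcdPy _ _
termination_by a.natAbs
decreasing_by exact pvModAbsLt b a h

theorem gcdPy_nonneg (a b : Int) (ha : 0 ≤ a) (hb : 0 ≤ b) :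
    gcdPy a b = (Nat.gcd a.toNat b.toNat : Int) := by
  by_cases h : a = 0
  · rw [gcdPy]; simp [h]; omega
  · rw [gcdPy]; simp only [h, dif_neg, not_false_iff]
    have hpos : 0 < a := lt_of_le_of_ne ha (Ne.symm h)
    have hm : PySem.Int.mod b a = ((b.toNat % a.toNat : Nat) : Int) := by
      have : PySem.Int.mod ((b.toNat : Nat) : Int) ((a.toNat : Nat) : Int) = ((b.toNat % a.toNat : Nat) : Int) :=
        PySem.Int.mod_natCast _ _
      simpa [Int.toNat_of_nonneg ha, Int.toNat_of_nonneg hb] using this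
    rw [hm, gcdPy_nonneg _ _ (by positivity) ha]
    conv_rhs => rw [Nat.gcd_rec]
    rw [Int.toNat_natCast]
termination_by a.natAbs
decreasing_by rw [← hm]; exact pvModAbsLt b a h

theorem gcdPy_neg (a b : Int) (ha : a ≤ 0) (hb : b < 0) : gcdPy a b < 0 := by
  by_cases h : a = 0
  · rw [gcdPy]; simp [h, hb]
  · rw [gcdPy]; simp only [h, dif_neg, not_false_iff]
    have hn : a < 0 := lt_of_le_of_ne ha h
    exact gcdPy_neg _ _ (PySem.Int.mod_neg_bounds b hn).2 hn
termination_by a.natAbs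
decreasing_by exact pvModAbsLt b a h

theorem checkPrime_iff (g : Int) : checkPrime g = true ↔ 2 ≤ g ∧ Nat.Prime g.toNat := by
  unfold checkPrime
  by_cases h1 : g ≤ 1
  · simp only [h1, if_true]
    constructor
    · intro h; cases h
    · rintro ⟨h2, -⟩; omega
  · rw [if_neg h1]
    push Not at h1
    rw [List.all_eq_true]
    constructor
    · intro hall
      refine ⟨by omega, ?_⟩
      rw [Nat.prime_def_le_sqrt]
      refine ⟨by omega, ?_⟩
      intro m h2m hms hdvd
      have hmem : (m : Int) ∈ PySem.List.pyRange 2 ((Nat.sqrt g.toNat : Int) + 1) := by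
        rw [PySem.List.mem_pyRange_one]
        constructor
        · exact_mod_cast h2m
        · have : (m : Int) ≤ (Nat.sqrt g.toNat : Int) := by exact_mod_cast hms
          omega
      have hm := hall _ hmem
      simp only [Bool.not_eq_eq_eq_not, Bool.not_true, beq_eq_false_iff_ne, ne_eq,
        PySem.Int.mod_eq_zero_iff_dvd] at hm
      apply hm
      have : (m : Int) ∣ (g.toNat : Int) := Int.natCast_dvd_natCast.mpr hdvd
      rwa [Int.toNat_of_nonneg (by omega)] at this
    · rintro ⟨h2, hp⟩ i hi
      rw [PySem.List.mem_pyRange_one] at hi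
      simp only [Bool.not_eq_eq_eq_not, Bool.not_true, beq_eq_false_iff_ne, ne_eq,
        PySem.Int.mod_eq_zero_iff_dvd]
      intro hdvd
      rw [Nat.prime_def_le_sqrt] at hp
      refine hp.2 i.toNat (by omega) (by omega) ?_
      have : (i.toNat : Int) ∣ (g.toNat : Int) := by
        rw [Int.toNat_of_nonneg (by omega : (0:Int) ≤ i), Int.toNat_of_nonneg (by omega : (0:Int) ≤ g)]
        exact hdvd
      exact_mod_cast this

theorem mem_foldl_nested_add (l : List Int) (r : Int → List Int) (s : PySem.Set Int) (y : Int) :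
    y ∈ l.foldl (fun s p => (r p).foldl (fun s m => s.add m) s) s ↔
      y ∈ s ∨ ∃ p ∈ l, y ∈ r p := by
  induction l generalizing s with
  | nil => simp
  | cons h t ih =>
    simp only [List.foldl_cons, ih, PySem.Set.mem_foldl_add (f := fun m => m), List.mem_cons]
    constructor
    · rintro (((hs | ⟨m, hm, rfl⟩) ) | ⟨p, hp, hy⟩)
      · exact Or.inl hs
      · exact Or.inr ⟨h, Or.inl rfl, hm⟩
      · exact Or.inr ⟨p, Or.inr hp, hy⟩
    · rintro (hs | ⟨p, (rfl | hp), hy⟩)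
      · exact Or.inl (Or.inl hs)
      · exact Or.inl (Or.inr ⟨y, hy, rfl⟩)
      · exact Or.inr ⟨p, hp, hy⟩

theorem mem_foldl_add_if (l : List Int) (q : Int → Bool) (s : PySem.Set Int) (y : Int) :
    y ∈ l.foldl (fun s n => if q n then s else s.add n) s ↔
      y ∈ s ∨ (y ∈ l ∧ q y = false) := by
  induction l generalizing s with
  | nil => simp
  | cons h t ih =>
    simp only [List.foldl_cons, List.mem_cons]
    by_cases hq : q h
    · rw [if_pos hq, ih]
      constructor
      · rintro (hs | ⟨ht, hf⟩)
        · exact Or.inl hs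
        · exact Or.inr ⟨Or.inr ht, hf⟩
      · rintro (hs | ⟨(rfl | ht), hf⟩)
        · exact Or.inl hs
        · rw [hq] at hf; cases hf
        · exact Or.inr ⟨ht, hf⟩
    · rw [if_neg hq, ih]
      simp only [PySem.Set.mem_add]
      constructor
      · rintro ((hs | rfl) | ⟨ht, hf⟩)
        · exact Or.inl hs
        · exact Or.inr ⟨Or.inl rfl, by simpa using hq⟩
        · exact Or.inr ⟨Or.inr ht, hf⟩
      · rintro (hs | ⟨(rfl | ht), hf⟩)
        · exact Or.inl (Or.inl hs)
        · exact Or.inl (Or.inr rfl)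
        · exact Or.inr ⟨ht, hf⟩

theorem mem_pvComp (L g : Int) :
    g ∈ pvComp L ↔ ∃ d k : Int, 2 ≤ d ∧ 2 ≤ k ∧ g = d * k ∧ g < L := by
  unfold pvComp
  rw [mem_foldl_nested_add]
  simp only [PySem.Set.empty, List.not_mem_nil, false_or]
  constructor
  · rintro ⟨p, hp, hm⟩
    rw [PySem.List.mem_pyRange_one] at hp
    rw [PySem.List.mem_pyRange_iff_of_pos (by omega)] at hm
    obtain ⟨h1, h2, k0, hk0⟩ := hm
    have hk0n : 0 ≤ k0 := by nlinarith
    refine ⟨p, k0 + 2, by omega, by omega, by linear_combination hk0, h2⟩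
  · rintro ⟨d, k, hd, hk, rfl, hb⟩
    have hdb : d < L := by nlinarith
    refine ⟨d, PySem.List.mem_pyRange_one.mpr ⟨hd, hdb⟩, ?_⟩
    rw [PySem.List.mem_pyRange_iff_of_pos (by omega)]
    refine ⟨by nlinarith, hb, k - 2, by ring⟩

theorem notcomp_iff_prime (L g : Int) (h2 : 2 ≤ g) (hb : g < L) :
    (¬ g ∈ pvComp L) ↔ Nat.Prime g.toNat := by
  rw [mem_pvComp]
  constructor
  · intro hno
    by_contra hnp
    obtain ⟨m, hdvd, hm2, hmlt⟩ := Nat.exists_dvd_of_not_prime2 (by omega) hnp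
    obtain ⟨k, hk⟩ := hdvd
    have hk2 : 2 ≤ k := by nlinarith
    apply hno
    refine ⟨(m : Int), (k : Int), by exact_mod_cast hm2, by exact_mod_cast hk2, ?_, hb⟩
    have : g = (g.toNat : Int) := by omega
    rw [this, hk]; push_cast; ring
  · rintro hp ⟨d, k, hd, hk, rfl, -⟩
    have hmul : (d * k).toNat = d.toNat * k.toNat := by
      rw [Int.toNat_mul (by omega) (by omega)]
    have hdd : d.toNat ∣ (d * k).toNat := ⟨k.toNat, hmul⟩
    rcases (hp.eq_one_or_self_of_dvd _ hdd) with h | h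
    · omega
    · rw [hmul] at h
      have hd2 : 2 ≤ d.toNat := by omega
      have hk2 : 2 ≤ k.toNat := by omega
      nlinarith

theorem mem_pvPrimes (L g : Int) :
    (pvPrimes L).contains g = true ↔ 2 ≤ g ∧ g < L ∧ Nat.Prime g.toNat := by
  have hc : (pvPrimes L).contains g = true ↔ g ∈ pvPrimes L := by
    simp [PySem.Set.contains]
  rw [hc]
  unfold pvPrimes
  rw [mem_foldl_add_if]
  have hcf : (pvComp L).contains g = false ↔ ¬ g ∈ pvComp L := by
    simp [PySem.Set.contains]
  simp only [PySem.Set.empty, List.not_mem_nil, false_or, PySem.List.mem_pyRange_one, hcf]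
  constructor
  · rintro ⟨⟨h2, hb⟩, hnc⟩
    exact ⟨h2, hb, (notcomp_iff_prime L g h2 hb).mp hnc⟩
  · rintro ⟨h2, hb, hp⟩
    exact ⟨⟨h2, hb⟩, (notcomp_iff_prime L g h2 hb).mpr hp⟩

-- the two membership tests agree on every pair the loops reach
theorem cond_eq (a b i j : Int) (ha : a ≤ i) (hij : i < j) (hj : j < b) :
    checkPrime (gcdPy i j) = (pvPrimes (min b (b - a))).contains (gcdPy i j) := by
  rcases lt_trichotomy i 0 with hi | hi | hi
  · have hstep : gcdPy i j = gcdPy (PySem.Int.mod j i) i := by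
      rw [gcdPy]; simp [show ¬ i = 0 by omega]
    have hneg : gcdPy i j < 0 := by
      rw [hstep]
      exact gcdPy_neg _ _ (PySem.Int.mod_neg_bounds j hi).2 hi
    rw [Bool.eq_iff_iff, checkPrime_iff, mem_pvPrimes]
    omega
  · subst hi
    have h0 : gcdPy 0 j = j := by rw [gcdPy]; simp
    have hjL : j < min b (b - a) := by omega
    rw [h0, Bool.eq_iff_iff, checkPrime_iff, mem_pvPrimes]
    constructor
    · rintro ⟨h2, hp⟩; exact ⟨h2, hjL, hp⟩
    · rintro ⟨h2, -, hp⟩; exact ⟨h2, hp⟩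
  · have hg : gcdPy i j = (Nat.gcd i.toNat j.toNat : Int) :=
      gcdPy_nonneg i j (by omega) (by omega)
    have hsub : (j - i).toNat = j.toNat - i.toNat := by omega
    have hdvd : Nat.gcd i.toNat j.toNat ∣ (j - i).toNat := by
      rw [hsub]
      exact Nat.dvd_sub (Nat.gcd_dvd_right _ _) (Nat.gcd_dvd_left _ _)
    have hle : Nat.gcd i.toNat j.toNat ≤ (j - i).toNat :=
      Nat.le_of_dvd (by omega) hdvd
    have hgb : gcdPy i j < min b (b - a) := by omega
    rw [Bool.eq_iff_iff, checkPrime_iff, mem_pvPrimes]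
    constructor
    · rintro ⟨h2, hp⟩; exact ⟨h2, hgb, hp⟩
    · rintro ⟨h2, -, hp⟩; exact ⟨h2, hp⟩

-- filterMap with an if-some-else-none body is filter-then-map
theorem filterMap_if_eq {α β : Type} (l : List α) (p : α → Bool) (f : α → β) :
    l.filterMap (fun x => if p x then some (f x) else none) = (l.filter p).map f := by
  induction l with
  | nil => rfl
  | cons h t ih =>
    by_cases hp : p h
    · simp [hp, ih]
    · simp [hp, ih]

-- ===== VERDICT (by name: the statement is the Claim_ definition above) =====
theorem findAB_spec : Claim_equal_findAB := by
  intro a b _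
  unfold Spec_findAB findAB findAB_alt
  simp only [PySem.List.foldl_append_if
      (p := fun j => checkPrime (gcdPy _ j)) (f := fun j => [_, j, gcdPy _ j]),
    PySem.List.foldl_append_eq_flatMap, List.nil_append, gcdB_eq_gcdPy]
  refine (List.flatMap_congr ?_).symm
  intro i hi
  rw [PySem.List.mem_pyRange_one] at hi
  rw [filterMap_if_eq (p := fun j => (pvPrimes (min b (b - a))).contains (gcdPy i j))
      (f := fun j => [i, j, gcdPy i j])]
  congr 1
  refine List.filter_congr ?_
  intro j hj
  rw [PySem.List.mem_pyRange_one] at hj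
  exact (cond_eq a b i j hi.1 (by omega) hj.2).symm
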